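-- pv_equiv track=rewrite | github.com/pipermerriam/ddht | ddht/v5_1/alexandria/partials.py | path_to_left_chunk_index
-- ===== SOURCE A (Python) =====
-- import itertools
-- from typing import IO, Collection, Iterable, Optional, Sequence, Tuple, Union
--
-- Key = Tuple[bool, ...]
--
-- def path_to_left_chunk_index(path: Key, path_bit_size: int) -> int:
--     """
--     Given a path, convert it to a chunk index.  In the case where the path is
--     to an intermediate tree node, return the chunk index on the leftmost branch
--     of the subtree.
--     """
--     return sum(
--         power_of_two
--         for path_bit, power_of_two in itertools.zip_longest(
--             path, reversed(POWERS_OF_TWO[:path_bit_size]), fillvalue=False,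
--         )
--         if path_bit
--     )
--
-- POWERS_OF_TWO = [2 ** n for n in range(256)]
-- ===== SOURCE B (Python) =====
-- def path_to_left_chunk_index(path, path_bit_size):
--     """
--     Streaming MSB-first accumulator: build the integer bit by bit, then pad
--     the missing low bits with a single left shift.  No precomputed table,
--     no zip_longest.
--     """
--     result = 0
--     count = 0
--     for bit in path[:path_bit_size]:
--         result = (result << 1) | (1 if bit else 0)
--         count += 1
--     return result << (path_bit_size - count)
-- ===== Notes on version B (the rewrite author's own statement) =====
-- stated objective: simpler
-- what changed: Replaces the precomputed 256-entry power table, slice/reverse and itertools.zip_longest sum of absolute powers of two by a direct MSB-first accumulator (result = (result<<1)|bit) followed by one left shift that pads the unset low bits.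
-- outside the precondition, e.g. on path_to_left_chunk_index((False, True, False, True, True), -2047): A returns 0, B raises ValueError
import Mathlib
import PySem

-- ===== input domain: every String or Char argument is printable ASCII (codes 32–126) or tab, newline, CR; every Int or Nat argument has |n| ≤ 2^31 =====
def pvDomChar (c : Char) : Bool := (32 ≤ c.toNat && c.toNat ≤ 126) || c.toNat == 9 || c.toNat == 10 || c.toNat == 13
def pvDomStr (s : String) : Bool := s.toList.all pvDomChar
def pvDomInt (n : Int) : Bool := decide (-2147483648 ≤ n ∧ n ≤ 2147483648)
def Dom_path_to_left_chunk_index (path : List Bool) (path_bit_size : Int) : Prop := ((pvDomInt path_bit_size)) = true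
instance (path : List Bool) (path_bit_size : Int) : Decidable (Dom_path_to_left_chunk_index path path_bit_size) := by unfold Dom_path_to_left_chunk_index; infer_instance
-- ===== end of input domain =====

-- B replaces A's power-table / zip_longest sum by an MSB-first shift-accumulate loop plus one
-- padding shift (objective: simpler; return value only, neither program mutates its arguments).

-- ===== PORT A =====
-- POWERS_OF_TWO = [2 ** n for n in range(256)]
def POWERS_OF_TWO : List Int := (PySem.List.pyRange 0 256 1).map (fun n => (2 : Int) ^ n.toNat)

-- itertools.zip_longest(path, pows, fillvalue=False); the Bool fill on the power side is summed
-- by Python as 0, so pairing it with 0 here is exact.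
def pvZipLongestBI : List Bool → List Int → List (Bool × Int)
  | [], [] => []
  | [], y :: ys => (false, y) :: pvZipLongestBI [] ys
  | x :: xs, [] => (x, 0) :: pvZipLongestBI xs []
  | x :: xs, y :: ys => (x, y) :: pvZipLongestBI xs ys

def path_to_left_chunk_index (path : List Bool) (path_bit_size : Int) : Int :=
  (((pvZipLongestBI path
      ((PySem.List.slice POWERS_OF_TWO none (some path_bit_size)).reverse)).filter
        (fun p => p.1)).map (fun p => p.2)).sum

-- ===== PORT B =====
def path_to_left_chunk_index_alt (path : List Bool) (path_bit_size : Int) : Int :=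
  let st := (PySem.List.slice path none (some path_bit_size)).foldl
    -- result = (result << 1) | (1 if bit else 0); count += 1   (result is nonnegative, so
    -- shift-or is exactly *2 + bit)
    (fun (rc : Int × Int) bit => (rc.1 * 2 + (if bit then 1 else 0), rc.2 + 1)) (0, 0)
  -- result << (path_bit_size - count); the shift amount is nonnegative under Pre_
  st.1 * 2 ^ (path_bit_size - st.2).toNat

-- ===== PRECONDITION & SPEC =====
-- Pre_ restricts to the natural domain of a bit size: for negative path_bit_size B raises
-- (negative shift) where A returns a table-slice artefact, and for path_bit_size > 256 A
-- silently clamps to its 256-entry table while B does not; both are outside any use of the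
-- function (the repository always passes 256).
def Pre_path_to_left_chunk_index (path : List Bool) (path_bit_size : Int) : Prop :=
  0 ≤ path_bit_size ∧ path_bit_size ≤ 256
instance (path : List Bool) (path_bit_size : Int) : Decidable (Pre_path_to_left_chunk_index path path_bit_size) := by unfold Pre_path_to_left_chunk_index; infer_instance

def pvWitness_path_to_left_chunk_index : List Bool × Int := ([true, false, true], 4)

def Spec_path_to_left_chunk_index (path : List Bool) (path_bit_size : Int) (out : Int) : Prop := out = path_to_left_chunk_index_alt path path_bit_size
instance (path : List Bool) (path_bit_size : Int) (out : Int) : Decidable (Spec_path_to_left_chunk_index path path_bit_size out) := by unfold Spec_path_to_left_chunk_index; infer_instance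

-- ===== CLAIM (what is proved, stated in full; the proofs are below) =====
def Claim_equal_path_to_left_chunk_index : Prop := ∀ (path : List Bool) (path_bit_size : Int), Dom_path_to_left_chunk_index path path_bit_size → Pre_path_to_left_chunk_index path path_bit_size → Spec_path_to_left_chunk_index path path_bit_size (path_to_left_chunk_index path path_bit_size)

-- ===== LEMMAS AND PROOFS =====

-- Shared specification: value of the first min(|l|, k) bits of l, weighted 2^(k-1), 2^(k-2), …
def pvS : List Bool → Nat → Int
  | [], _ => 0
  | _ :: _, 0 => 0
  | b :: bs, k + 1 => (if b then (2 : Int) ^ k else 0) + pvS bs k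

-- the reversed slice of the power table, in closed form
def pvPows (k : Nat) : List Int := (((List.range k).map (fun j => (2 : Int) ^ j)).reverse)

theorem pvPows_succ (k : Nat) : pvPows (k + 1) = (2 : Int) ^ k :: pvPows k := by
  simp [pvPows, List.range_succ]

theorem pvPowsA (k : Nat) (hk : k ≤ 256) :
    (PySem.List.slice POWERS_OF_TWO none (some (k : Int))).reverse = pvPows k := by
  rw [PySem.List.slice_to_natCast]
  unfold POWERS_OF_TWO pvPows
  rw [PySem.List.pyRange_one]
  simp [← List.map_take, List.take_range, Nat.min_eq_left hk, Function.comp]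

def pvAsum (l : List Bool) (p : List Int) : Int :=
  (((pvZipLongestBI l p).filter (fun q => q.1)).map (fun q => q.2)).sum

theorem pvAsum_nil (p : List Int) : pvAsum [] p = 0 := by
  induction p with
  | nil => simp [pvAsum, pvZipLongestBI]
  | cons y ys ih =>
    simp only [pvAsum, pvZipLongestBI] at *
    simp [ih]

theorem pvAsum_nil_right (l : List Bool) : pvAsum l [] = 0 := by
  induction l with
  | nil => simp [pvAsum, pvZipLongestBI]
  | cons x xs ih =>
    simp only [pvAsum, pvZipLongestBI] at *
    cases x <;> simp [ih]

theorem pvAsum_cons (x : Bool) (xs : List Bool) (y : Int) (ys : List Int) :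
    pvAsum (x :: xs) (y :: ys) = (if x then y else 0) + pvAsum xs ys := by
  cases x <;> simp [pvAsum, pvZipLongestBI]

theorem pvAsum_pows (l : List Bool) : ∀ k : Nat, pvAsum l (pvPows k) = pvS l k := by
  induction l with
  | nil => intro k; simp [pvAsum_nil, pvS]
  | cons b bs ih =>
    intro k
    cases k with
    | zero => simp [pvPows, pvAsum_nil_right, pvS]
    | succ k => rw [pvPows_succ, pvAsum_cons, ih]; simp [pvS]

-- B's loop: fold characterization
theorem pvFold (l : List Bool) : ∀ r c : Int,
    l.foldl (fun (rc : Int × Int) bit => (rc.1 * 2 + (if bit then 1 else 0), rc.2 + 1)) (r, c)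
      = (r * 2 ^ l.length + pvS l l.length, c + l.length) := by
  induction l with
  | nil => intro r c; simp [pvS]
  | cons b bs ih =>
    intro r c
    simp only [List.foldl_cons, List.length_cons, ih, pvS, Prod.mk.injEq]
    refine ⟨?_, by push_cast; ring⟩
    cases b <;> simp [pow_succ] <;> ring

theorem pvS_take (l : List Bool) : ∀ k : Nat,
    pvS (l.take k) (l.take k).length * 2 ^ (k - (l.take k).length) = pvS l k := by
  induction l with
  | nil => intro k; simp [pvS]
  | cons b bs ih =>
    intro k
    cases k with
    | zero => simp [pvS]
    | succ k =>
      have hlen : (bs.take k).length ≤ k := by simp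
      simp only [List.take_succ_cons, List.length_cons, pvS]
      rw [add_mul, ← ih k]
      have h2 : (k + 1) - ((bs.take k).length + 1) = k - (bs.take k).length := by omega
      rw [h2]
      congr 1
      cases b
      · simp
      · simp only [if_pos]
        rw [← pow_add]
        congr 1
        omega

-- ===== VERDICT (by name: the statement is the Claim_ definition above) =====
theorem path_to_left_chunk_index_spec : Claim_equal_path_to_left_chunk_index := by
  intro path pbs _ hpre
  obtain ⟨h0, h256⟩ := hpre
  unfold Spec_path_to_left_chunk_index path_to_left_chunk_index path_to_left_chunk_index_alt
  obtain ⟨k, rfl⟩ := Int.eq_ofNat_of_zero_le h0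
  have hk : k ≤ 256 := by exact_mod_cast h256
  show pvAsum path _ = _
  rw [pvPowsA k hk, pvAsum_pows, PySem.List.slice_to_natCast]
  simp only [pvFold]
  have hlen : (path.take k).length ≤ k := by simp
  have harg : ((k : Int) - (0 + (path.take k).length)).toNat = k - (path.take k).length := by
    omega
  rw [harg, zero_mul, zero_add, pvS_take]
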